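-- pv_equiv track=rewrite | github.com/Wilker00/Multiverse | core/safe_executor.py | _is_safety_violation
-- ===== SOURCE A (Python) =====
-- from typing import Any, Dict, List, Optional, Set, Tuple
--
-- def _is_safety_violation(info: Dict[str, Any]) -> bool:
--     safety_true_keys = (
--         "wrong_park",
--         "collision",
--         "crash",
--         "boundary_violation",
--         "unsafe",
--         "failure",
--         "fell_cliff",
--         "fell_pit",
--         "hit_laser",
--         "battery_depleted",
--         "hit_wall",
--         "hit_obstacle",
--         "battery_death",
--     )
--     for k in safety_true_keys:
--         if info.get(k) is True:
--             return True
--     return False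
-- ===== SOURCE B (Python) =====
-- _SAFETY_KEYS = frozenset({
--     "wrong_park", "collision", "crash", "boundary_violation", "unsafe",
--     "failure", "fell_cliff", "fell_pit", "hit_laser", "battery_depleted",
--     "hit_wall", "hit_obstacle", "battery_death",
-- })
--
-- def _is_safety_violation(info):
--     return any(k in _SAFETY_KEYS and v is True for k, v in info.items())
-- ===== Notes on version B (the rewrite author's own statement) =====
-- stated objective: idiomatic
-- what changed: B iterates over the dict's items testing each key against a frozenset of the 13 safety keys inside a single any(...), instead of A's loop over the fixed key tuple doing a dict lookup per key.
import Mathlib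
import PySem

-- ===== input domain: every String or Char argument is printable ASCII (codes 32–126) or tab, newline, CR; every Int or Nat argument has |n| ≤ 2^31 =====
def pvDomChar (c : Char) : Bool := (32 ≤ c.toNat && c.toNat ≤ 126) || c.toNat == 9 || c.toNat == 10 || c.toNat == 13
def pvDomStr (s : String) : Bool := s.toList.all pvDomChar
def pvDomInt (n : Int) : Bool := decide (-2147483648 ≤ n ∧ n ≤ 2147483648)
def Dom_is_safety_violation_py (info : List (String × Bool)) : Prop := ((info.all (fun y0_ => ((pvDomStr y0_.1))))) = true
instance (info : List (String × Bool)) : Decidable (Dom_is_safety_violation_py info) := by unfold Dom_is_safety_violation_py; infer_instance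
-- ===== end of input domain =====

-- B iterates the dict's entries testing each key against a set of the 13 safety keys, instead of looking each fixed key up in the dict; objective: idiomatic.


-- ===== PORT A =====
def pvSafetyKeys : List String :=
  ["wrong_park", "collision", "crash", "boundary_violation", "unsafe",
   "failure", "fell_cliff", "fell_pit", "hit_laser", "battery_depleted",
   "hit_wall", "hit_obstacle", "battery_death"]

-- A's 'for k in safety_true_keys: if info.get(k) is True: return True'
def pvALoop (info : List (String × Bool)) : List String → Bool
  | [] => false
  | k :: ks => if (PySem.Dict.mk info).get? k = some true then true else pvALoop info ks

def is_safety_violation_py (info : List (String × Bool)) : Bool :=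
  pvALoop info pvSafetyKeys

-- ===== PORT B =====
def pvSafetySet : PySem.Set String :=
  PySem.Set.ofList
    ["wrong_park", "collision", "crash", "boundary_violation", "unsafe",
     "failure", "fell_cliff", "fell_pit", "hit_laser", "battery_depleted",
     "hit_wall", "hit_obstacle", "battery_death"]

-- B's 'any(k in _SAFETY_KEYS and v is True for k, v in info.items())'
def is_safety_violation_py_alt (info : List (String × Bool)) : Bool :=
  info.any (fun p => PySem.Set.contains pvSafetySet p.1 && p.2)

-- ===== PRECONDITION & SPEC =====
-- A Python dict cannot contain the same key twice; Pre_ excludes association lists with a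
-- repeated key, which correspond to no Python dict (so no input Python A accepts is excluded).
def Pre_is_safety_violation_py (info : List (String × Bool)) : Prop :=
  (info.map Prod.fst).Nodup
instance (info : List (String × Bool)) : Decidable (Pre_is_safety_violation_py info) := by
  unfold Pre_is_safety_violation_py; infer_instance

def pvWitness_is_safety_violation_py : (List (String × Bool)) :=
  [("crash", false), ("speed_ok", true), ("hit_wall", true)]

def Spec_is_safety_violation_py (info : List (String × Bool)) (out : Bool) : Prop :=
  out = is_safety_violation_py_alt info
instance (info : List (String × Bool)) (out : Bool) : Decidable (Spec_is_safety_violation_py info out) := by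
  unfold Spec_is_safety_violation_py; infer_instance

-- ===== CLAIM (what is proved, stated in full; the proofs are below) =====
def Claim_equal_is_safety_violation_py : Prop := ∀ (info : List (String × Bool)), Dom_is_safety_violation_py info → Pre_is_safety_violation_py info → Spec_is_safety_violation_py info (is_safety_violation_py info)

-- ===== LEMMAS AND PROOFS =====

theorem pvALoop_eq_any (info : List (String × Bool)) (ks : List String) :
    pvALoop info ks = ks.any (fun k => decide ((PySem.Dict.mk info).get? k = some true)) := by
  induction ks with
  | nil => rfl
  | cons k ks ih =>
    by_cases h : (PySem.Dict.mk info).get? k = some true <;> simp [pvALoop, ih, h]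

theorem pvMkKeys (info : List (String × Bool)) :
    (PySem.Dict.mk info).keys = info.map Prod.fst := rfl

theorem pvMkItems (info : List (String × Bool)) :
    (PySem.Dict.mk info).items = info := rfl

theorem is_safety_violation_py_spec : Claim_equal_is_safety_violation_py := by
  intro info _ hpre
  unfold Spec_is_safety_violation_py
  rw [Bool.eq_iff_iff]
  unfold is_safety_violation_py is_safety_violation_py_alt
  rw [pvALoop_eq_any]
  simp only [List.any_eq_true, decide_eq_true_eq, Bool.and_eq_true,
    PySem.Set.contains_iff, pvSafetySet, PySem.Set.mem_ofList]
  have hnd : (PySem.Dict.mk info).keys.Nodup := by rw [pvMkKeys]; exact hpre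
  constructor
  · rintro ⟨k, hk, hget⟩
    have := PySem.Dict.mem_items_of_get?_eq_some (d := PySem.Dict.mk info) hget
    rw [pvMkItems] at this
    exact ⟨(k, true), this, by simpa [pvSafetyKeys] using hk, rfl⟩
  · rintro ⟨⟨k, v⟩, hmem, hkin, hv⟩
    refine ⟨k, by simpa [pvSafetyKeys] using hkin, ?_⟩
    rw [PySem.Dict.get?_eq_some_iff_mem_items _ _ _ hnd, pvMkItems]
    subst hv; exact hmem
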